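-- pv_equiv track=rewrite | github.com/jserv/cortexm-linux | scripts/analyze-kernel-pgo.py | infer_hotspot_categories
-- ===== SOURCE A (Python) =====
-- HOTSPOT_RULES = [
--     (
--         "initramfs-gzip",
--         {"inflate_fast", "zlib_inflate", "zlib_inflate_table", "gunzip"},
--         "Initramfs decompression is hot. Keep one decompressor and disable unused RD_* codecs.",
--     ),
--     (
--         "fdt",
--         {"fdt_next_tag", "fdt_offset_ptr", "fdt_get_string", "__of_find_property", "of_find_property", "parse_prop_cells"},
--         "Device-tree parsing is hot. Revisit DT size and disable unused platform/device drivers selected from defconfig.",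
--     ),
--     (
--         "mem-init",
--         {"pfn_valid", "init_unavailable_range", "__init_single_page", "memmap_init_range", "overlap_memmap_init"},
--         "Early memory setup is hot. Prioritize pruning subsystems that enlarge memblock/page allocator work.",
--     ),
--     (
--         "console",
--         {"mps2_early_putchar", "uart_console_write", "mps2_uart_console_putchar", "vsnprintf"},
--         "Console output is a noticeable boot cost. Keep printk noise and dynamic-debug style features minimized.",
--     ),
--     (
--         "path-lookup",
--         {"link_path_walk", "do_mmap", "dput", "__d_alloc"},
--         "VFS path lookup shows up in boot. Review procfs/debugfs/sysfs exposure and early userspace command count.",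
--     ),
-- ]
--
-- def infer_hotspot_categories(top_symbols):
--     names = {name for _, name in top_symbols[:40]}
--     categories = []
--     for category, markers, note in HOTSPOT_RULES:
--         matched = sorted(names & markers)
--         if matched:
--             categories.append((category, matched, note))
--     return categories
-- ===== SOURCE B (Python) =====
-- HOTSPOT_RULES = [
--     (
--         "initramfs-gzip",
--         {"inflate_fast", "zlib_inflate", "zlib_inflate_table", "gunzip"},
--         "Initramfs decompression is hot. Keep one decompressor and disable unused RD_* codecs.",
--     ),
--     (
--         "fdt",
--         {"fdt_next_tag", "fdt_offset_ptr", "fdt_get_string", "__of_find_property", "of_find_property", "parse_prop_cells"},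
--         "Device-tree parsing is hot. Revisit DT size and disable unused platform/device drivers selected from defconfig.",
--     ),
--     (
--         "mem-init",
--         {"pfn_valid", "init_unavailable_range", "__init_single_page", "memmap_init_range", "overlap_memmap_init"},
--         "Early memory setup is hot. Prioritize pruning subsystems that enlarge memblock/page allocator work.",
--     ),
--     (
--         "console",
--         {"mps2_early_putchar", "uart_console_write", "mps2_uart_console_putchar", "vsnprintf"},
--         "Console output is a noticeable boot cost. Keep printk noise and dynamic-debug style features minimized.",
--     ),
--     (
--         "path-lookup",
--         {"link_path_walk", "do_mmap", "dput", "__d_alloc"},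
--         "VFS path lookup shows up in boot. Review procfs/debugfs/sysfs exposure and early userspace command count.",
--     ),
-- ]
--
-- # Inverted index: each marker symbol -> its (unique) category.
-- MARKER_INDEX = {
--     "inflate_fast": "initramfs-gzip",
--     "zlib_inflate": "initramfs-gzip",
--     "zlib_inflate_table": "initramfs-gzip",
--     "gunzip": "initramfs-gzip",
--     "fdt_next_tag": "fdt",
--     "fdt_offset_ptr": "fdt",
--     "fdt_get_string": "fdt",
--     "__of_find_property": "fdt",
--     "of_find_property": "fdt",
--     "parse_prop_cells": "fdt",
--     "pfn_valid": "mem-init",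
--     "init_unavailable_range": "mem-init",
--     "__init_single_page": "mem-init",
--     "memmap_init_range": "mem-init",
--     "overlap_memmap_init": "mem-init",
--     "mps2_early_putchar": "console",
--     "uart_console_write": "console",
--     "mps2_uart_console_putchar": "console",
--     "vsnprintf": "console",
--     "link_path_walk": "path-lookup",
--     "do_mmap": "path-lookup",
--     "dput": "path-lookup",
--     "__d_alloc": "path-lookup",
-- }
--
--
-- def infer_hotspot_categories(top_symbols):
--     # Distinct symbol names of the top 40, one pass through the marker index.
--     ordered_names = list(dict.fromkeys(name for _, name in top_symbols[:40]))
--     hits = [(MARKER_INDEX[name], name) for name in ordered_names if name in MARKER_INDEX]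
--     buckets = {}
--     for cat, name in hits:
--         buckets.setdefault(cat, []).append(name)
--     return [
--         (category, sorted(buckets[category]), note)
--         for category, _, note in HOTSPOT_RULES
--         if category in buckets
--     ]
-- ===== Notes on version B (the rewrite author's own statement) =====
-- stated objective: alternative
-- what changed: Replaces the per-rule set intersections with a precomputed marker->category inverted index: one pass over the deduplicated top-40 names classifies each name via the index into per-category buckets, and the rules list is then walked once only to emit non-empty buckets in the fixed rule order.
import Mathlib
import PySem

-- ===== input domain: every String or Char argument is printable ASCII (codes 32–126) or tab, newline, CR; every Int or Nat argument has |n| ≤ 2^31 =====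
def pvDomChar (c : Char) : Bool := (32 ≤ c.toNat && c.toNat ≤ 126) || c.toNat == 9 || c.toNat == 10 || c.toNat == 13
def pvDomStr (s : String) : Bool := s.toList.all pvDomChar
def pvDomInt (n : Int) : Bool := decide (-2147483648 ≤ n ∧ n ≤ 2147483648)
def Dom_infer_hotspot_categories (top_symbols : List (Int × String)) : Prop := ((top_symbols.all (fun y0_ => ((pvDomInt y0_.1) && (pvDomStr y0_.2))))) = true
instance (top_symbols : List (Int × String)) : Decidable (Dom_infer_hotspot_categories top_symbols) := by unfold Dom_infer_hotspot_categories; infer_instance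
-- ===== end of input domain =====

-- B replaces the per-rule set intersections with a precomputed marker->category index and one
-- classifying pass over the deduplicated top-40 names (objective: alternative decomposition).

-- ===== PORT A =====
-- HOTSPOT_RULES: module constant used by both programs (markers are Python set literals).
def pvHotspotRules : List (String × List String × String) := [
  ("initramfs-gzip",
   PySem.Set.ofList ["inflate_fast", "zlib_inflate", "zlib_inflate_table", "gunzip"],
   "Initramfs decompression is hot. Keep one decompressor and disable unused RD_* codecs."),
  ("fdt",
   PySem.Set.ofList ["fdt_next_tag", "fdt_offset_ptr", "fdt_get_string", "__of_find_property", "of_find_property", "parse_prop_cells"],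
   "Device-tree parsing is hot. Revisit DT size and disable unused platform/device drivers selected from defconfig."),
  ("mem-init",
   PySem.Set.ofList ["pfn_valid", "init_unavailable_range", "__init_single_page", "memmap_init_range", "overlap_memmap_init"],
   "Early memory setup is hot. Prioritize pruning subsystems that enlarge memblock/page allocator work."),
  ("console",
   PySem.Set.ofList ["mps2_early_putchar", "uart_console_write", "mps2_uart_console_putchar", "vsnprintf"],
   "Console output is a noticeable boot cost. Keep printk noise and dynamic-debug style features minimized."),
  ("path-lookup",
   PySem.Set.ofList ["link_path_walk", "do_mmap", "dput", "__d_alloc"],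
   "VFS path lookup shows up in boot. Review procfs/debugfs/sysfs exposure and early userspace command count.")]

def infer_hotspot_categories (top_symbols : List (Int × String)) : List (String × List String × String) :=
  -- names = {name for _, name in top_symbols[:40]}
  let names : PySem.Set String :=
    PySem.Set.ofList ((PySem.List.slice top_symbols none (some 40)).map (fun p => p.2))
  -- for category, markers, note in HOTSPOT_RULES: matched = sorted(names & markers); if matched: append
  pvHotspotRules.foldl (fun categories r =>
    let matched := PySem.List.sorted (PySem.Set.inter names r.2.1) (fun x => x) false
    if matched ≠ [] then categories ++ [(r.1, matched, r.2.2)] else categories) []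

-- ===== PORT B =====
-- MARKER_INDEX: dict literal (distinct keys, in literal order).
def pvIndexPairs : List (String × String) := [
  ("inflate_fast", "initramfs-gzip"),
  ("zlib_inflate", "initramfs-gzip"),
  ("zlib_inflate_table", "initramfs-gzip"),
  ("gunzip", "initramfs-gzip"),
  ("fdt_next_tag", "fdt"),
  ("fdt_offset_ptr", "fdt"),
  ("fdt_get_string", "fdt"),
  ("__of_find_property", "fdt"),
  ("of_find_property", "fdt"),
  ("parse_prop_cells", "fdt"),
  ("pfn_valid", "mem-init"),
  ("init_unavailable_range", "mem-init"),
  ("__init_single_page", "mem-init"),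
  ("memmap_init_range", "mem-init"),
  ("overlap_memmap_init", "mem-init"),
  ("mps2_early_putchar", "console"),
  ("uart_console_write", "console"),
  ("mps2_uart_console_putchar", "console"),
  ("vsnprintf", "console"),
  ("link_path_walk", "path-lookup"),
  ("do_mmap", "path-lookup"),
  ("dput", "path-lookup"),
  ("__d_alloc", "path-lookup")]

def pvMarkerIndex : PySem.Dict String String := PySem.Dict.mk pvIndexPairs

def infer_hotspot_categories_alt (top_symbols : List (Int × String)) : List (String × List String × String) :=
  -- ordered_names = list(dict.fromkeys(name for _, name in top_symbols[:40]))
  let orderedNames : List String :=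
    PySem.List.dedup ((PySem.List.slice top_symbols none (some 40)).map (fun p => p.2))
  -- hits = [(MARKER_INDEX[name], name) for name in ordered_names if name in MARKER_INDEX]
  -- (guarded subscript: exact as filterMap over the index lookup)
  let hits : List (String × String) :=
    orderedNames.filterMap (fun n => (pvMarkerIndex.get? n).map (fun c => (c, n)))
  -- for cat, name in hits: buckets.setdefault(cat, []).append(name)
  let buckets : PySem.Dict String (List String) :=
    hits.foldl (fun d p => d.modify p.1 [] (fun l => l ++ [p.2])) PySem.Dict.empty
  -- [(category, sorted(buckets[category]), note) for category, _, note in HOTSPOT_RULES if category in buckets]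
  pvHotspotRules.foldl (fun out r =>
    if buckets.contains r.1 then
      out ++ [(r.1, PySem.List.sorted (buckets.getD r.1 []) (fun x => x) false, r.2.2)]
    else out) []

-- ===== PRECONDITION & SPEC =====
def Spec_infer_hotspot_categories (top_symbols : List (Int × String)) (out : List (String × List String × String)) : Prop := out = infer_hotspot_categories_alt top_symbols
instance (top_symbols : List (Int × String)) (out : List (String × List String × String)) : Decidable (Spec_infer_hotspot_categories top_symbols out) := by unfold Spec_infer_hotspot_categories; infer_instance

-- ===== CLAIM (what is proved, stated in full; the proofs are below) =====
def Claim_equal_infer_hotspot_categories : Prop := ∀ (top_symbols : List (Int × String)), Dom_infer_hotspot_categories top_symbols → Spec_infer_hotspot_categories top_symbols (infer_hotspot_categories top_symbols)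

-- ===== LEMMAS AND PROOFS =====

-- get? on a dict literal with distinct keys is literal membership of the pair
lemma pvGet?_mk_iff (ps : List (String × String)) (h : (ps.map Prod.fst).Nodup) (n c : String) :
    (PySem.Dict.mk ps).get? n = some c ↔ (n, c) ∈ ps := by
  induction ps with
  | nil => simp [PySem.Dict.get?]
  | cons p ps ih =>
    simp only [List.map_cons, List.nodup_cons] at h
    by_cases hk : p.1 = n
    · subst hk
      simp [PySem.Dict.get?]
      constructor
      · rintro rfl; exact Or.inl Prod.mk.eta
      · rintro (he | hm)
        · exact (congrArg Prod.snd he).symm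
        · exact absurd (List.mem_map.mpr ⟨_, hm, rfl⟩) h.1
    · have heq : (PySem.Dict.mk (p :: ps)).get? n = (PySem.Dict.mk ps).get? n := by
        simp [PySem.Dict.get?, hk]
      rw [heq, ih h.2, List.mem_cons]
      constructor
      · exact fun hm => Or.inr hm
      · rintro (he | hm)
        · exact absurd (congrArg Prod.fst he).symm hk
        · exact hm

-- the hits comprehension, restricted to one category, is a filter of the names
lemma pvHits_filter (idx : PySem.Dict String String) (l : List String) (c : String) :
    ((l.filterMap (fun n => (idx.get? n).map (fun k => (k, n)))).filter
      (fun p => p.1 == c)).map (fun p => p.2)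
    = l.filter (fun n => idx.get? n == some c) := by
  induction l with
  | nil => rfl
  | cons a l ih =>
    cases hg : idx.get? a with
    | none => simp [hg, ih]
    | some k =>
      by_cases hk : k = c
      · subst hk; simp [hg, ih]
      · simp [hg, hk, ih]

-- per-category: the index lookup agrees with membership in that rule's marker set
lemma pvCat1 (n : String) : (pvMarkerIndex.get? n == some "initramfs-gzip")
    = (PySem.Set.ofList ["inflate_fast", "zlib_inflate", "zlib_inflate_table", "gunzip"]).contains n := by
  rw [Bool.eq_iff_iff, beq_iff_eq, PySem.Set.contains_iff, PySem.Set.mem_ofList, pvMarkerIndex,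
      pvGet?_mk_iff pvIndexPairs (by decide)]
  simp [pvIndexPairs, Prod.ext_iff]

lemma pvCat2 (n : String) : (pvMarkerIndex.get? n == some "fdt")
    = (PySem.Set.ofList ["fdt_next_tag", "fdt_offset_ptr", "fdt_get_string", "__of_find_property", "of_find_property", "parse_prop_cells"]).contains n := by
  rw [Bool.eq_iff_iff, beq_iff_eq, PySem.Set.contains_iff, PySem.Set.mem_ofList, pvMarkerIndex,
      pvGet?_mk_iff pvIndexPairs (by decide)]
  simp [pvIndexPairs, Prod.ext_iff]

lemma pvCat3 (n : String) : (pvMarkerIndex.get? n == some "mem-init")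
    = (PySem.Set.ofList ["pfn_valid", "init_unavailable_range", "__init_single_page", "memmap_init_range", "overlap_memmap_init"]).contains n := by
  rw [Bool.eq_iff_iff, beq_iff_eq, PySem.Set.contains_iff, PySem.Set.mem_ofList, pvMarkerIndex,
      pvGet?_mk_iff pvIndexPairs (by decide)]
  simp [pvIndexPairs, Prod.ext_iff]

lemma pvCat4 (n : String) : (pvMarkerIndex.get? n == some "console")
    = (PySem.Set.ofList ["mps2_early_putchar", "uart_console_write", "mps2_uart_console_putchar", "vsnprintf"]).contains n := by
  rw [Bool.eq_iff_iff, beq_iff_eq, PySem.Set.contains_iff, PySem.Set.mem_ofList, pvMarkerIndex,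
      pvGet?_mk_iff pvIndexPairs (by decide)]
  simp [pvIndexPairs, Prod.ext_iff]

lemma pvCat5 (n : String) : (pvMarkerIndex.get? n == some "path-lookup")
    = (PySem.Set.ofList ["link_path_walk", "do_mmap", "dput", "__d_alloc"]).contains n := by
  rw [Bool.eq_iff_iff, beq_iff_eq, PySem.Set.contains_iff, PySem.Set.mem_ofList, pvMarkerIndex,
      pvGet?_mk_iff pvIndexPairs (by decide)]
  simp [pvIndexPairs, Prod.ext_iff]

-- sorting does not change emptiness
lemma pvSortedNil (xs : List String) :
    (PySem.List.sorted xs (fun x => x) false = []) ↔ xs = [] := by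
  have hlen := (PySem.List.sorted_perm xs (fun x => x) false).length_eq
  rw [← List.length_eq_zero_iff, ← List.length_eq_zero_iff, hlen]

-- the bucket of category c holds exactly the names the index sends to c
lemma pvBucket_getD (l : List String) (c : String) :
    (((l.filterMap (fun n => (pvMarkerIndex.get? n).map (fun c => (c, n)))).foldl
        (fun d p => d.modify p.1 [] (fun v => v ++ [p.2])) PySem.Dict.empty).getD c [])
    = l.filter (fun n => pvMarkerIndex.get? n == some c) := by
  rw [PySem.Dict.getD_foldl_modify_append, pvHits_filter]
  rfl

-- a category key is present in the buckets iff its bucket is non-empty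
lemma pvBucket_contains (l : List String) (c : String) :
    (((l.filterMap (fun n => (pvMarkerIndex.get? n).map (fun c => (c, n)))).foldl
        (fun d p => d.modify p.1 [] (fun v => v ++ [p.2])) PySem.Dict.empty).contains c = true)
    ↔ ¬ (l.filter (fun n => pvMarkerIndex.get? n == some c) = []) := by
  rw [← pvHits_filter]
  have hkeys := PySem.Dict.keys_foldl_modify_key
      (l.filterMap (fun n => (pvMarkerIndex.get? n).map (fun c => (c, n))))
      (Prod.fst) [] (fun _ p v => v ++ [p.2]) PySem.Dict.empty
  have hmem : ∀ (d : PySem.Dict String (List String)) (k : String),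
      d.contains k = true ↔ k ∈ d.keys := by
    intro d k
    simp [PySem.Dict.contains, PySem.Dict.keys, List.any_eq_true, List.mem_map]
  rw [hmem, hkeys]
  have hup : PySem.Set.update (PySem.Dict.empty : PySem.Dict String (List String)).keys
      ((l.filterMap (fun n => (pvMarkerIndex.get? n).map (fun c => (c, n)))).map Prod.fst)
      = PySem.Set.ofList ((l.filterMap (fun n => (pvMarkerIndex.get? n).map (fun c => (c, n)))).map Prod.fst) := rfl
  rw [hup, PySem.Set.mem_ofList]
  simp only [List.map_eq_nil_iff, List.filter_eq_nil_iff, List.mem_map]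
  push Not
  constructor
  · rintro ⟨p, hp, rfl⟩; exact ⟨p, hp, by simp⟩
  · rintro ⟨p, hp, hc⟩; exact ⟨p, hp, by simpa using hc⟩

-- ===== VERDICT (by name: the statement is the Claim_ definition above) =====
theorem infer_hotspot_categories_spec : Claim_equal_infer_hotspot_categories := by
  intro ts _
  unfold Spec_infer_hotspot_categories infer_hotspot_categories infer_hotspot_categories_alt
  simp only [PySem.List.dedup_eq_ofList]
  simp only [pvHotspotRules, List.foldl_cons, List.foldl_nil, PySem.Set.inter, ne_eq,
    pvBucket_getD, pvBucket_contains, pvSortedNil, pvCat1, pvCat2, pvCat3, pvCat4, pvCat5]
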